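-- pv_equiv track=rewrite | github.com/muhammadaliyusuf/spelling-correction-jwd | utils/preprocessing.py | preprocessingtext
-- ===== SOURCE A (Python) =====
-- def preprocessingtext(kalimat, daftar_kata_stopword):
--
--     # Case Folding
--     lower_case = kalimat.lower()
--
--     # Cleaning (Menghapus Karakter whitespace)
--     kalimat = lower_case.strip()
--
--     # Cleaning (Menghapus Karakter simbol & tanda baca)
--     punctuation = '''!()-[]}{;:'"\|,.<>/?@#$%^&*_`~'''
--
--     cleaning_punctuation = ""
--     for char in kalimat:
--         if (char not in punctuation):
--             cleaning_punctuation = cleaning_punctuation + char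
--
--     # Cleaning (Menghapus Karakter Angka)
--     cleaning_number = ""
--     for char in cleaning_punctuation:
--         if not char.isdigit():
--             cleaning_number = cleaning_number + char
--
--     # Tokenizing
--     tokens = cleaning_number.split()
--
--     stp = []
--     for i in tokens:
--         if i not in daftar_kata_stopword:
--             stp.append(i)
--
--     return stp
-- ===== SOURCE B (Python) =====
-- def preprocessingtext(kalimat, daftar_kata_stopword):
--     punctuation = set('''!()-[]}{;:'"\|,.<>/?@#$%^&*_`~''')
--     result = []
--     for raw in kalimat.lower().split():
--         word = ''.join(ch for ch in raw if ch not in punctuation and not ch.isdigit())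
--         if word and word not in daftar_kata_stopword:
--             result.append(word)
--     return result
-- ===== Notes on version B (the rewrite author's own statement) =====
-- stated objective: alternative
-- what changed: Instead of A's three sequential whole-string passes (strip, punctuation removal by repeated string concatenation, digit removal) followed by split and a stopword loop, B splits the lowercased string into tokens first and cleans each token with a single combined character filter built by join, skipping tokens that clean to empty or are stopwords.
import Mathlib
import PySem

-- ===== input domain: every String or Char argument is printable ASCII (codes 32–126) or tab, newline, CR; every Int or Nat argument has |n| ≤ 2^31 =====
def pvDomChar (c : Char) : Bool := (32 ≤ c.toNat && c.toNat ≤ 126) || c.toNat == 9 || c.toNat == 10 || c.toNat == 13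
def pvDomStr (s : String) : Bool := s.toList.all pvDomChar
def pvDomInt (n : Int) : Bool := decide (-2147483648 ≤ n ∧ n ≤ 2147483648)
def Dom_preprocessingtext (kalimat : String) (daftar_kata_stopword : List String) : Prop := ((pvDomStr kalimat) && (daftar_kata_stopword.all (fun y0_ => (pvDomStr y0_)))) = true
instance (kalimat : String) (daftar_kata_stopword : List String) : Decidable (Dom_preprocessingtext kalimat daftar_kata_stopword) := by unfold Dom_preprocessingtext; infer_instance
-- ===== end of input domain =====

-- B splits the lowercased text into tokens first and cleans each token with one combined
-- character filter, instead of A's whole-string sequential passes before splitting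
-- (objective: alternative decomposition, same result).

-- the punctuation characters of both Pythons' literal '''!()-[]}{;:'"\|,.<>/?@#$%^&*_`~'''
def pvPunct : List Char :=
  ['!','(',')','-','[',']','}','{',';',':','\'','"','\\','|',',','.','<','>','/','?','@','#','$','%','^','&','*','_','`','~']

-- ===== PORT A =====
def preprocessingtext (kalimat : String) (daftar_kata_stopword : List String) : List String :=
  -- Case Folding
  let lower_case := PySem.Chars.lower kalimat.toList
  -- Cleaning whitespace (strip)
  let kal := PySem.Chars.strip lower_case
  -- Cleaning punctuation, char-by-char rebuild ('char in punctuation' on a str = 1-char-substring test = membership, exact)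
  let cleaning_punctuation :=
    kal.foldl (fun acc c => if !(PySem.Chars.isIn [c] pvPunct) then acc ++ [c] else acc) ([] : List Char)
  -- Cleaning digits, char-by-char rebuild
  let cleaning_number :=
    cleaning_punctuation.foldl (fun acc c => if !(PySem.Chars.isdigit c) then acc ++ [c] else acc) ([] : List Char)
  -- Tokenizing
  let tokens := PySem.Chars.split₀ cleaning_number
  -- stopword loop
  tokens.foldl (fun acc t =>
    if !(daftar_kata_stopword.contains (String.ofList t)) then acc ++ [String.ofList t] else acc) ([] : List String)

-- ===== PORT B =====
-- B's combined per-character keep predicate: not punctuation and not a digit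
def pvKeep (c : Char) : Bool := !(pvPunct.contains c) && !(PySem.Chars.isdigit c)

def preprocessingtext_alt (kalimat : String) (daftar_kata_stopword : List String) : List String :=
  (PySem.Chars.split₀ (PySem.Chars.lower kalimat.toList)).foldl (fun acc raw =>
    let word := raw.filter pvKeep
    if !word.isEmpty && !(daftar_kata_stopword.contains (String.ofList word)) then
      acc ++ [String.ofList word]
    else acc) ([] : List String)

-- ===== PRECONDITION & SPEC =====
def Spec_preprocessingtext (kalimat : String) (daftar_kata_stopword : List String) (out : List String) : Prop := out = preprocessingtext_alt kalimat daftar_kata_stopword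
instance (kalimat : String) (daftar_kata_stopword : List String) (out : List String) : Decidable (Spec_preprocessingtext kalimat daftar_kata_stopword out) := by unfold Spec_preprocessingtext; infer_instance

-- ===== CLAIM (what is proved, stated in full; the proofs are below) =====
def Claim_equal_preprocessingtext : Prop := ∀ (kalimat : String) (daftar_kata_stopword : List String), Dom_preprocessingtext kalimat daftar_kata_stopword → Spec_preprocessingtext kalimat daftar_kata_stopword (preprocessingtext kalimat daftar_kata_stopword)

-- ===== LEMMAS AND PROOFS =====

-- reference whitespace splitter keeping empty pieces
def pvSplitW : List Char → List (List Char)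
  | [] => [[]]
  | c :: rest =>
    if PySem.Chars.isspace c then [] :: pvSplitW rest
    else (pvSplitW rest).modifyHead (c :: ·)

-- drop the empty pieces (what Python's no-argument split does)
def pvNE (X : List (List Char)) : List (List Char) := X.filter (fun t => !t.isEmpty)

theorem pvSplitW_head_tail (cs : List Char) :
    pvSplitW cs = cs.takeWhile (fun c => !PySem.Chars.isspace c) :: (pvSplitW cs).tail := by
  induction cs with
  | nil => simp [pvSplitW]
  | cons c rest ih =>
    by_cases h : PySem.Chars.isspace c
    · simp [pvSplitW, h, List.takeWhile]
    · rw [pvSplitW]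
      simp only [h]
      rw [ih]
      simp [List.takeWhile, h]

theorem pv_modifyHead_id (l : List (List Char)) : l.modifyHead (fun x => x) = l := by
  cases l <;> rfl

-- the split₀ accumulator loop, characterised by pvSplitW
theorem pv_go_eq (cs : List Char) : ∀ cur acc,
    PySem.Chars.split₀.go cs cur acc =
      acc.reverse ++ pvNE ((pvSplitW cs).modifyHead (cur.reverse ++ ·)) := by
  induction cs with
  | nil =>
    intro cur acc
    rw [PySem.Chars.split₀.go]
    by_cases h : cur = []
    · simp [h, pvSplitW, pvNE]
    · simp [h, pvSplitW, pvNE, List.isEmpty_iff]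
  | cons c rest ih =>
    intro cur acc
    rw [PySem.Chars.split₀.go]
    by_cases hs : PySem.Chars.isspace c
    · by_cases h : cur = []
      · simp [hs, h, ih, pvSplitW, pvNE, pv_modifyHead_id]
      · simp [hs, h, ih, pvSplitW, pvNE, List.isEmpty_iff, pv_modifyHead_id]
    · obtain ⟨t, ht⟩ : ∃ t, pvSplitW rest = rest.takeWhile (fun c => !PySem.Chars.isspace c) :: t :=
        ⟨_, pvSplitW_head_tail rest⟩
      simp [hs, ih, pvSplitW, ht, pvNE]

theorem pv_split₀_eq (cs : List Char) : PySem.Chars.split₀ cs = pvNE (pvSplitW cs) := by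
  rw [PySem.Chars.split₀, pv_go_eq]
  simp [pv_modifyHead_id]

-- whitespace characters survive B's filter
theorem pvKeep_of_space (c : Char) (h : PySem.Chars.isspace c = true) : pvKeep c = true := by
  rw [pvKeep, Bool.and_eq_true, Bool.not_eq_true', Bool.not_eq_true']
  constructor
  · by_contra hc
    rw [Bool.not_eq_false] at hc
    have hm : c ∈ pvPunct := by simpa using hc
    fin_cases hm <;> exact absurd h (by decide)
  · by_contra hd
    rw [Bool.not_eq_false, PySem.Chars.isdigit, Bool.and_eq_true, decide_eq_true_eq, decide_eq_true_eq] at hd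
    obtain ⟨h1, h2⟩ := hd
    rw [Char.le_def] at h1 h2
    have e1 : (48 : Nat) ≤ c.val.toNat := UInt32.le_iff_toNat_le.mp h1
    have e2 : c.val.toNat ≤ (57 : Nat) := UInt32.le_iff_toNat_le.mp h2
    simp only [PySem.Chars.isspace, Bool.or_eq_true, Bool.and_eq_true, decide_eq_true_eq] at h
    have hv : c.toNat = c.val.toNat := rfl
    rw [hv] at h
    omega

-- cleaning commutes with the splitter
theorem pvSplitW_filter (cs : List Char) :
    pvSplitW (cs.filter pvKeep) = (pvSplitW cs).map (List.filter pvKeep) := by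
  induction cs with
  | nil => simp [pvSplitW]
  | cons c rest ih =>
    obtain ⟨t, ht⟩ : ∃ t, pvSplitW rest = rest.takeWhile (fun c => !PySem.Chars.isspace c) :: t :=
      ⟨_, pvSplitW_head_tail rest⟩
    by_cases hs : PySem.Chars.isspace c
    · simp [List.filter, pvKeep_of_space c hs, pvSplitW, hs, ih]
    · by_cases hk : pvKeep c
      · simp [List.filter, hk, pvSplitW, hs, ih, ht]
      · simp [List.filter, hk, pvSplitW, hs, ih, ht]

-- leading whitespace is irrelevant once empty pieces are dropped
theorem pv_lstrip (cs : List Char) :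
    pvNE ((pvSplitW (PySem.Chars.lstrip cs)).map (List.filter pvKeep)) =
      pvNE ((pvSplitW cs).map (List.filter pvKeep)) := by
  induction cs with
  | nil => rfl
  | cons c rest ih =>
    by_cases hs : PySem.Chars.isspace c
    · simpa [PySem.Chars.lstrip, List.dropWhile_cons, hs, pvSplitW, pvNE] using ih
    · simp [PySem.Chars.lstrip, List.dropWhile_cons, hs]

theorem pv_allspace (ws : List Char) (hws : ∀ c ∈ ws, PySem.Chars.isspace c = true) :
    pvNE ((pvSplitW ws).map (List.filter pvKeep)) = [] := by
  induction ws with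
  | nil => rfl
  | cons c rest ih =>
    have hc := hws c (by simp)
    simp only [pvSplitW, hc, if_true]
    simpa [pvNE] using ih (fun d hd => hws d (by simp [hd]))

theorem pv_takeWhile_space (ws : List Char) (hws : ∀ c ∈ ws, PySem.Chars.isspace c = true) :
    ws.takeWhile (fun c => !PySem.Chars.isspace c) = [] := by
  cases ws with
  | nil => rfl
  | cons c rest => simp [List.takeWhile, hws c (by simp)]

theorem pv_takeWhile_len (l : List Char) (p : Char → Bool)
    (h : (l.takeWhile p).length = l.length) : l.takeWhile p = l :=
  (List.takeWhile_prefix p).eq_of_length h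

theorem pvNE_cons (x : List Char) (l : List (List Char)) :
    pvNE (x :: l) = if x.isEmpty then pvNE l else x :: pvNE l := by
  by_cases h : x.isEmpty <;> simp [pvNE, List.filter_cons, h]

-- trailing whitespace is irrelevant once empty pieces are dropped
theorem pv_append_space (ws : List Char) (hws : ∀ c ∈ ws, PySem.Chars.isspace c = true) :
    ∀ cs, pvNE ((pvSplitW (cs ++ ws)).map (List.filter pvKeep)) =
      pvNE ((pvSplitW cs).map (List.filter pvKeep)) := by
  intro cs
  induction cs with
  | nil => simpa [pvSplitW, pvNE] using pv_allspace ws hws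
  | cons c rest ih =>
    by_cases hs : PySem.Chars.isspace c
    · simpa [pvSplitW, hs, pvNE] using ih
    · obtain ⟨t1, ht1⟩ : ∃ t, pvSplitW (rest ++ ws) =
          (rest ++ ws).takeWhile (fun c => !PySem.Chars.isspace c) :: t :=
        ⟨_, pvSplitW_head_tail _⟩
      obtain ⟨t2, ht2⟩ : ∃ t, pvSplitW rest =
          rest.takeWhile (fun c => !PySem.Chars.isspace c) :: t :=
        ⟨_, pvSplitW_head_tail _⟩
      have hhead : (rest ++ ws).takeWhile (fun c => !PySem.Chars.isspace c) =
          rest.takeWhile (fun c => !PySem.Chars.isspace c) := by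
        rw [List.takeWhile_append]
        split_ifs with hl
        · rw [pv_takeWhile_space ws hws, pv_takeWhile_len _ _ hl, List.append_nil]
        · rfl
      rw [hhead] at ht1
      have ih' := ih
      rw [ht1, ht2] at ih'
      simp only [List.map_cons, pvNE_cons] at ih'
      have htail : pvNE (t1.map (List.filter pvKeep)) = pvNE (t2.map (List.filter pvKeep)) := by
        by_cases he : (List.filter pvKeep (rest.takeWhile (fun c => !PySem.Chars.isspace c))).isEmpty
        · simpa [he] using ih'
        · simp only [he, if_false] at ih'
          exact (List.cons.injEq _ _ _ _).mp ih' |>.2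
      show pvNE (((pvSplitW (c :: (rest ++ ws)))).map (List.filter pvKeep)) = _
      simp only [pvSplitW, hs, ht1, ht2, List.modifyHead_cons]
      simp only [Bool.false_eq_true, if_false, List.map_cons, pvNE_cons, htail]

-- stripping is irrelevant once empty pieces are dropped
theorem pv_strip (cs : List Char) :
    pvNE ((pvSplitW (PySem.Chars.strip cs)).map (List.filter pvKeep)) =
      pvNE ((pvSplitW cs).map (List.filter pvKeep)) := by
  rw [PySem.Chars.strip]
  rw [← pv_lstrip cs]
  set m := PySem.Chars.lstrip cs with hm
  have hdecomp : m = PySem.Chars.rstrip m ++ (m.reverse.takeWhile PySem.Chars.isspace).reverse := by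
    rw [PySem.Chars.rstrip]
    conv_lhs => rw [← List.reverse_reverse m, ← List.takeWhile_append_dropWhile
      (p := PySem.Chars.isspace) (l := m.reverse)]
    rw [List.reverse_append]
  have hws : ∀ c ∈ (m.reverse.takeWhile PySem.Chars.isspace).reverse, PySem.Chars.isspace c = true := by
    intro c hc
    rw [List.mem_reverse] at hc
    exact List.mem_takeWhile_imp hc
  conv_rhs => rw [hdecomp]
  exact (pv_append_space _ hws _).symm

-- A's per-char punctuation test equals B's membership test
theorem pv_isIn_singleton (c : Char) (l : List Char) :
    PySem.Chars.isIn [c] l = l.contains c := by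
  by_cases h : c ∈ l
  · rw [(PySem.Chars.isIn_iff_infix [c] l).mpr ((List.singleton_infix_iff c l).mpr h),
      List.contains_eq_mem, decide_eq_true h]
  · rw [(PySem.Chars.isIn_eq_false_iff [c] l).mpr (fun hi => h ((List.singleton_infix_iff c l).mp hi)),
      List.contains_eq_mem, decide_eq_false h]

-- the stopword stage, in A's shape (clean first) and B's shape (filter per token)
theorem pv_final (stop : List String) (X : List (List Char)) :
    ((pvNE (X.map (List.filter pvKeep))).filter
        (fun t => !(stop.contains (String.ofList t)))).map String.ofList =
      ((pvNE X).filter (fun raw =>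
          !(raw.filter pvKeep).isEmpty && !(stop.contains (String.ofList (raw.filter pvKeep))))).map
        (fun raw => String.ofList (raw.filter pvKeep)) := by
  induction X with
  | nil => rfl
  | cons x l ih =>
    simp only [List.contains_eq_mem] at ih ⊢
    by_cases hx : x.isEmpty
    · have hxe : x = [] := by simpa [List.isEmpty_iff] using hx
      simp [hxe, pvNE_cons, ih]
    · by_cases he : (x.filter pvKeep).isEmpty
      · simp [pvNE_cons, hx, he, List.filter_cons, ih]
      · by_cases hstop : String.ofList (x.filter pvKeep) ∈ stop
        · simp [pvNE_cons, hx, he, hstop, List.filter_cons, ih]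
        · simp [pvNE_cons, hx, he, hstop, List.filter_cons, ih]

-- ===== VERDICT (by name: the statement is the Claim_ definition above) =====
theorem preprocessingtext_spec : Claim_equal_preprocessingtext := by
  intro kalimat stop _
  unfold Spec_preprocessingtext preprocessingtext preprocessingtext_alt
  simp only [PySem.List.foldl_append_if, List.nil_append, List.map_id_fun', id_eq, id, List.filter_filter]
  have hfil : (List.filter (fun a => !PySem.Chars.isdigit a && !PySem.Chars.isIn [a] pvPunct)
      (PySem.Chars.strip (PySem.Chars.lower kalimat.toList))) =
      (PySem.Chars.strip (PySem.Chars.lower kalimat.toList)).filter pvKeep := by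
    apply List.filter_congr
    intro c _
    simp [pvKeep, pv_isIn_singleton, Bool.and_comm]
  rw [hfil, pv_split₀_eq, pvSplitW_filter, pv_strip, pv_split₀_eq, pv_final]
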